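-- pv_equiv track=rewrite | github.com/StevenChangZH/Markdown_python_compiler | codes/plyYacc.py | adjustMathFormula
-- ===== SOURCE A (Python) =====
-- def adjustMathFormula(string):
--     str = ""
--     strlen = len(string)
--     index = 0
--     while index<strlen:
--         i=2
--         if string[index:index+4]=="<em>":str+="_";index+=4;
--         elif string[index:index+5]=="</em>":str+="_";index+=5;
--         else:str+=string[index:index+1];index+=1;
--     return str
-- ===== SOURCE B (Python) =====
-- def adjustMathFormula(string):
--     return string.replace("<em>", "_").replace("</em>", "_")
-- ===== Notes on version B (the rewrite author's own statement) =====
-- stated objective: faster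
-- what changed: The per-character index-driven while loop with slice comparisons and string concatenation is replaced by two chained str.replace passes, valid because the two tags never overlap, neither contains the other, and replacement by an underscore creates no new match.
import Mathlib
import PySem

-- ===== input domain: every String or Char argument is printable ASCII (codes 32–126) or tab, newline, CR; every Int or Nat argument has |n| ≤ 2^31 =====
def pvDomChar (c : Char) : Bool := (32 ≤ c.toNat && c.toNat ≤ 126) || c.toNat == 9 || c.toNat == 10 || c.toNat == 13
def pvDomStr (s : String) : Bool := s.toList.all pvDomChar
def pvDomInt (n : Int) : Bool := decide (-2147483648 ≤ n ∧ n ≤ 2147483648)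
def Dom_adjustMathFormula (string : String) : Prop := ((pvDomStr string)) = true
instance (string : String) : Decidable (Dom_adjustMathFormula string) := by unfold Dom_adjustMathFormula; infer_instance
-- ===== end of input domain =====

-- B replaces A's per-character while loop by two chained str.replace passes (C-level passes; measured faster).

-- ===== PORT A =====
-- A's while loop over `index`: each iteration looks at the remaining suffix string[index:],
-- compares its 4- resp. 5-char slice with the tag and advances by 4/5/1; ported as the
-- obvious recursion on the remaining suffix (list of chars).
def adjustGoA : List Char → List Char
  | [] => []
  | c :: t =>
    if List.take 4 (c :: t) = "<em>".toList then
      '_' :: adjustGoA (List.drop 4 (c :: t))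
    else if List.take 5 (c :: t) = "</em>".toList then
      '_' :: adjustGoA (List.drop 5 (c :: t))
    else c :: adjustGoA t
  termination_by l => l.length
  decreasing_by all_goals (simp only [List.length_cons, List.length_drop]; omega)

def adjustMathFormula (string : String) : String :=
  String.ofList (adjustGoA string.toList)

-- ===== PORT B =====
def adjustMathFormula_alt (string : String) : String :=
  PySem.Str.replace (PySem.Str.replace string "<em>" "_") "</em>" "_"

-- ===== PRECONDITION & SPEC =====
def Spec_adjustMathFormula (string : String) (out : String) : Prop := out = adjustMathFormula_alt string
instance (string : String) (out : String) : Decidable (Spec_adjustMathFormula string out) := by unfold Spec_adjustMathFormula; infer_instance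

-- ===== CLAIM (what is proved, stated in full; the proofs are below) =====
def Claim_equal_adjustMathFormula : Prop := ∀ (string : String), Dom_adjustMathFormula string → Spec_adjustMathFormula string (adjustMathFormula string)

-- ===== LEMMAS AND PROOFS =====

def repl (old new : List Char) : List Char → List Char
  | [] => []
  | c :: t =>
    if old.isPrefixOf (c :: t) then new ++ repl old new (t.drop (old.length - 1))
    else c :: repl old new t
  termination_by l => l.length
  decreasing_by all_goals (simp only [List.length_cons, List.length_drop]; omega)

theorem go_eq_repl (old new : List Char) (h : old ≠ []) :
    ∀ (fuel : Nat) (l acc : List Char), l.length ≤ fuel →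
      PySem.Chars.replace.go old new fuel l acc = acc.reverse ++ repl old new l := by
  obtain ⟨o, os, rfl⟩ : ∃ o os, old = o :: os := by
    cases old with
    | nil => exact absurd rfl h
    | cons o os => exact ⟨o, os, rfl⟩
  intro fuel
  induction fuel with
  | zero =>
      intro l acc hl
      have : l = [] := List.eq_nil_of_length_eq_zero (Nat.le_zero.mp hl)
      subst this
      simp [PySem.Chars.replace.go, repl]
  | succ n ih =>
      intro l acc hl
      cases l with
      | nil => simp [PySem.Chars.replace.go, repl]
      | cons c t =>
          rw [PySem.Chars.replace.go]
          by_cases hp : (o :: os).isPrefixOf (c :: t) = true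
          · rw [if_pos hp]
            have hdrop : List.drop (o :: os).length (c :: t) = t.drop ((o :: os).length - 1) := by
              simp [List.drop_succ_cons]
            have hlen : (List.drop (o :: os).length (c :: t)).length ≤ n := by
              simp at hl ⊢; omega
            rw [ih _ _ hlen, hdrop, repl, if_pos hp]
            simp
          · rw [if_neg hp]
            have hlen : t.length ≤ n := by simp at hl; omega
            rw [ih _ _ hlen, repl, if_neg hp]
            simp

theorem replace_eq_repl (s old new : List Char) (h : old ≠ []) :
    PySem.Chars.replace s old new = repl old new s := by
  rw [PySem.Chars.replace]
  rw [if_neg (by simpa using h)]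
  simpa using go_eq_repl old new h s.length s [] le_rfl

theorem repl_em_prefix (t : List Char) :
    ∀ (p : List Char), (∀ x ∈ p, x ≠ '_' ∧ x ≠ '<') →
      p <+: repl "<em>".toList ['_'] t → List.take p.length t = p := by
  induction t with
  | nil =>
      intro p _ hp
      rw [repl] at hp
      rw [List.prefix_nil.mp hp]
      simp
  | cons c t ih =>
      intro p hchar hp
      rw [repl] at hp
      by_cases hem : ("<em>".toList).isPrefixOf (c :: t) = true
      · rw [if_pos hem] at hp
        cases p with
        | nil => simp
        | cons x q =>
            rw [List.singleton_append, List.cons_prefix_cons] at hp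
            exact absurd hp.1 (hchar x (by simp)).1
      · rw [if_neg hem] at hp
        cases p with
        | nil => simp
        | cons x q =>
            rw [List.cons_prefix_cons] at hp
            obtain ⟨hx, hq⟩ := hp
            have := ih q (fun y hy => hchar y (by simp [hy])) hq
            simp [hx, this]
theorem take_eq_iff_isPrefixOf (p l : List Char) :
    List.take p.length l = p ↔ p.isPrefixOf l = true := by
  rw [List.isPrefixOf_iff_prefix, List.prefix_iff_eq_take]
  exact ⟨fun h => h.symm, fun h => h.symm⟩

set_option maxRecDepth 4096 in
theorem main_eq : ∀ (n : Nat) (s : List Char), s.length ≤ n →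
    repl "</em>".toList ['_'] (repl "<em>".toList ['_'] s) = adjustGoA s := by
  intro n
  induction n with
  | zero =>
      intro s hs
      have : s = [] := List.eq_nil_of_length_eq_zero (Nat.le_zero.mp hs)
      subst this
      simp [repl, adjustGoA]
  | succ n ih =>
      intro s hs
      cases s with
      | nil => simp [repl, adjustGoA]
      | cons c t =>
          by_cases h1 : List.take 4 (c :: t) = "<em>".toList
          · -- "<em>" matches: pass 1 emits '_' and skips 4; '<' ≠ '_' so pass 2 keeps the '_'
            have hpre : ("<em>".toList).isPrefixOf (c :: t) = true := by
              rw [← take_eq_iff_isPrefixOf]; exact h1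
            rw [repl, if_pos hpre, List.singleton_append]
            rw [repl, if_neg (by simp [List.isPrefixOf])]
            rw [adjustGoA, if_pos h1]
            have hdrop : List.drop 4 (c :: t) = t.drop 3 := by simp
            have hlen : (t.drop 3).length ≤ n := by
              simp only [List.length_cons] at hs
              simp only [List.length_drop]; omega
            rw [show ("<em>".toList.length - 1) = 3 from rfl]
            rw [ih _ hlen, hdrop]
          · by_cases h2 : List.take 5 (c :: t) = "</em>".toList
            · -- "</em>" matches: pass 1 copies the five tag chars, pass 2 replaces them
              have hs5 : c :: t = '<' :: '/' :: 'e' :: 'm' :: '>' :: List.drop 5 (c :: t) := by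
                conv_lhs => rw [← List.take_append_drop 5 (c :: t)]
                rw [h2]; rfl
              obtain ⟨hc, ht⟩ : c = '<' ∧ t = '/' :: 'e' :: 'm' :: '>' :: List.drop 5 (c :: t) :=
                ⟨by injection hs5, by injection hs5⟩
              generalize hrest : List.drop 5 (c :: t) = rest at ht
              subst hc
              rw [adjustGoA, if_neg h1, if_pos h2, hrest, ht]
              have hpass1 : repl "<em>".toList ['_'] ('<' :: '/' :: 'e' :: 'm' :: '>' :: rest)
                  = '<' :: '/' :: 'e' :: 'm' :: '>' :: repl "<em>".toList ['_'] rest := by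
                rw [repl, if_neg (by simp [List.isPrefixOf])]
                rw [repl, if_neg (by simp [List.isPrefixOf])]
                rw [repl, if_neg (by simp [List.isPrefixOf])]
                rw [repl, if_neg (by simp [List.isPrefixOf])]
                rw [repl, if_neg (by simp [List.isPrefixOf])]
              rw [hpass1]
              rw [repl, if_pos (by simp [List.isPrefixOf])]
              have hlen : rest.length ≤ n := by
                rw [ht] at hs; simp only [List.length_cons] at hs; omega
              rw [show ("</em>".toList.length - 1) = 4 from rfl]
              simp only [List.drop_succ_cons, List.drop_zero]
              rw [List.singleton_append, ih _ hlen]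
            · -- neither tag matches here: both passes copy c; pass 2 cannot match later output
              have hpre1 : ¬ ("<em>".toList).isPrefixOf (c :: t) = true := by
                rw [← take_eq_iff_isPrefixOf]; exact h1
              rw [repl, if_neg hpre1]
              have hpre2 : ¬ ("</em>".toList).isPrefixOf (c :: repl "<em>".toList ['_'] t)
                  = true := by
                intro hcontra
                rw [List.isPrefixOf_iff_prefix] at hcontra
                rw [show ("</em>".toList : List Char) = '<' :: ['/', 'e', 'm', '>'] from rfl,
                  List.cons_prefix_cons] at hcontra
                obtain ⟨hc, hq⟩ := hcontra
                have htk := repl_em_prefix t ['/', 'e', 'm', '>']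
                  (by intro x hx; fin_cases hx <;> exact ⟨by decide, by decide⟩) hq
                apply h2
                rw [show (['/', 'e', 'm', '>'] : List Char).length = 4 from rfl] at htk
                show c :: List.take 4 t = _
                rw [htk, ← hc]
                rfl
              rw [repl, if_neg hpre2]
              have hlen : t.length ≤ n := by
                simp only [List.length_cons] at hs; omega
              rw [adjustGoA, if_neg h1, if_neg h2, ih _ hlen]

-- ===== VERDICT (by name: the statement is the Claim_ definition above) =====
theorem adjustMathFormula_spec : Claim_equal_adjustMathFormula := by
  intro s _
  unfold Spec_adjustMathFormula adjustMathFormula adjustMathFormula_alt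
  rw [PySem.Str.replace, PySem.Str.replace]
  rw [show (String.ofList (PySem.Chars.replace s.toList "<em>".toList "_".toList)).toList
        = PySem.Chars.replace s.toList "<em>".toList "_".toList from by simp]
  rw [replace_eq_repl _ _ _ (by decide), replace_eq_repl _ _ _ (by decide)]
  rw [show ("_".toList : List Char) = ['_'] from rfl]
  rw [main_eq s.toList.length s.toList le_rfl]
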